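-- pv_equiv track=rewrite | github.com/ggchilev/hack_bulgaria | second.py | birthday_ranges
-- ===== SOURCE A (Python) =====
-- def birthday_ranges(birthdays, ranges):
--     list = []
--
--     for rang in ranges:
--         num = 0
--
--         for day in birthdays:
--             if day in range(rang[0], rang[1] + 1):
--                 num += 1
--
--         list.append(num)
--
--     return list
-- ===== SOURCE B (Python) =====
-- def birthday_ranges(birthdays, ranges):
--     ys = sorted(birthdays)
--
--     def bisect_left(xs, x):
--         lo, hi = 0, len(xs)
--         while lo < hi:
--             mid = (lo + hi) // 2
--             if xs[mid] < x:
--                 lo = mid + 1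
--             else:
--                 hi = mid
--         return lo
--
--     def bisect_right(xs, x):
--         lo, hi = 0, len(xs)
--         while lo < hi:
--             mid = (lo + hi) // 2
--             if xs[mid] <= x:
--                 lo = mid + 1
--             else:
--                 hi = mid
--         return lo
--
--     return [max(bisect_right(ys, hi) - bisect_left(ys, lo), 0)
--             for lo, hi in ranges]
-- ===== Notes on version B (the rewrite author's own statement) =====
-- stated objective: faster
-- what changed: B sorts the birthdays once and answers each range with two hand-written binary searches (bisect_right - bisect_left) instead of A's linear scan of all birthdays per range.
import Mathlib
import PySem

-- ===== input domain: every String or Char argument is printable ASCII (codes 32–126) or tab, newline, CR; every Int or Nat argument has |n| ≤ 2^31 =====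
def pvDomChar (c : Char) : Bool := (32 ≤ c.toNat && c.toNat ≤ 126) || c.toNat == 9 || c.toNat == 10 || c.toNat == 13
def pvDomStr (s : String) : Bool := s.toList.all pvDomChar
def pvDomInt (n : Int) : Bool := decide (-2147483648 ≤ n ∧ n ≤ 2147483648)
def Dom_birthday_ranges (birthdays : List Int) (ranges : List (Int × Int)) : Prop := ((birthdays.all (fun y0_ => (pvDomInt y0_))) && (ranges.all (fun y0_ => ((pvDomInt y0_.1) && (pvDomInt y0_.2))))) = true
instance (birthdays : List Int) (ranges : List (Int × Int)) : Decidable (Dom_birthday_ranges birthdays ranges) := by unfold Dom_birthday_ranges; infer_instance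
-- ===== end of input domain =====

-- B sorts once and uses two binary searches per range instead of A's per-range linear scan; measurably faster.

-- ===== PORT A =====
-- literal port: outer loop over ranges appending, inner loop counting `day in range(lo, hi+1)` i.e. lo ≤ day < hi+1
def birthday_ranges (birthdays : List Int) (ranges : List (Int × Int)) : List Int :=
  ranges.foldl
    (fun acc rang =>
      acc ++ [birthdays.foldl
        (fun num day => if rang.1 ≤ day ∧ day < rang.2 + 1 then num + 1 else num) 0])
    []

-- ===== PORT B =====
-- Source B's hand-written bisect_left/bisect_right loops are exactly PySem.List.bisectLeft/bisectRight (same lo/hi/mid loop)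
def birthday_ranges_alt (birthdays : List Int) (ranges : List (Int × Int)) : List Int :=
  let ys := PySem.List.sorted birthdays (fun x => x) false
  ranges.map (fun r =>
    max ((PySem.List.bisectRight ys r.2 : Int) - (PySem.List.bisectLeft ys r.1 : Int)) 0)

-- ===== PRECONDITION & SPEC =====
def Spec_birthday_ranges (birthdays : List Int) (ranges : List (Int × Int)) (out : List Int) : Prop := out = birthday_ranges_alt birthdays ranges
instance (birthdays : List Int) (ranges : List (Int × Int)) (out : List Int) : Decidable (Spec_birthday_ranges birthdays ranges out) := by unfold Spec_birthday_ranges; infer_instance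

-- ===== CLAIM (what is proved, stated in full; the proofs are below) =====
def Claim_equal_birthday_ranges : Prop := ∀ (birthdays : List Int) (ranges : List (Int × Int)), Dom_birthday_ranges birthdays ranges → Spec_birthday_ranges birthdays ranges (birthday_ranges birthdays ranges)

-- ===== LEMMAS AND PROOFS =====

-- a list whose first r positions satisfy p and the rest do not has countP p = r
theorem countP_eq_of_split (p : Int → Bool) (l : List Int) (r : Nat)
    (hr : r ≤ l.length)
    (h1 : ∀ (j : Nat) (hj : j < l.length), j < r → p l[j] = true)
    (h2 : ∀ (j : Nat) (hj : j < l.length), r ≤ j → p l[j] = false) :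
    l.countP p = r := by
  induction l generalizing r with
  | nil => simp only [List.length_nil, Nat.le_zero] at hr; simp [hr]
  | cons x t ih =>
    cases r with
    | zero =>
      simp only [List.countP_cons]
      have hx : p x = false := h2 0 (by simp) (Nat.zero_le _)
      have ht : t.countP p = 0 := by
        rw [List.countP_eq_zero]
        intro a ha
        obtain ⟨j, hj, rfl⟩ := List.getElem_of_mem ha
        have := h2 (j + 1) (by simpa using Nat.succ_lt_succ hj) (Nat.zero_le _)
        simpa using this
      simp [hx, ht]
    | succ s =>
      have hx : p x = true := h1 0 (by simp) (Nat.succ_pos _)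
      have ht : t.countP p = s := by
        apply ih
        · simpa using hr
        · intro j hj hjs
          have := h1 (j + 1) (by simpa using Nat.succ_lt_succ hj) (Nat.succ_lt_succ hjs)
          simpa using this
        · intro j hj hsj
          have := h2 (j + 1) (by simpa using Nat.succ_lt_succ hj) (Nat.succ_le_succ hsj)
          simpa using this
      simp [hx, ht]

-- bisectLeft on a sorted list counts the elements < a
theorem bisectLeft_eq_countP (ys : List Int) (a : Int)
    (hs : ys.Pairwise (fun x y => x ≤ y)) :
    PySem.List.bisectLeft ys a = ys.countP (fun d => decide (d < a)) := by
  obtain ⟨hle, h1, h2⟩ := PySem.List.bisectLeft_spec ys a hs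
  symm
  apply countP_eq_of_split _ _ _ hle
  · intro j hj hjr; simpa using h1 j hj hjr
  · intro j hj hrj
    have := h2 j hj hrj
    simp only [decide_eq_false_iff_not, not_lt]
    exact this

-- bisectRight on a sorted list counts the elements ≤ b
theorem bisectRight_eq_countP (ys : List Int) (b : Int)
    (hs : ys.Pairwise (fun x y => x ≤ y)) :
    PySem.List.bisectRight ys b = ys.countP (fun d => decide (d ≤ b)) := by
  obtain ⟨hle, h1, h2⟩ := PySem.List.bisectRight_spec ys b hs
  symm
  apply countP_eq_of_split _ _ _ hle
  · intro j hj hjr; simpa using h1 j hj hjr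
  · intro j hj hrj
    have := h2 j hj hrj
    simp only [decide_eq_false_iff_not, not_le]
    exact this

-- A's inner loop is a countP
theorem innerA_eq_countP (birthdays : List Int) (a b : Int) (n : Int) :
    birthdays.foldl (fun num day => if a ≤ day ∧ day < b + 1 then num + 1 else num) n
      = n + (birthdays.countP (fun d => decide (a ≤ d ∧ d ≤ b)) : Int) := by
  induction birthdays generalizing n with
  | nil => simp
  | cons x t ih =>
    simp only [List.foldl_cons, List.countP_cons]
    by_cases hx : a ≤ x ∧ x ≤ b
    · have : a ≤ x ∧ x < b + 1 := ⟨hx.1, by omega⟩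
      rw [if_pos this, ih]
      simp [hx]
      ring
    · have : ¬ (a ≤ x ∧ x < b + 1) := by omega
      rw [if_neg this, ih]
      simp [hx]

-- the bisect difference equals the closed-interval count, on any list
theorem countP_interval (l : List Int) (a b : Int) :
    max ((l.countP (fun d => decide (d ≤ b)) : Int) - (l.countP (fun d => decide (d < a)) : Int)) 0
      = (l.countP (fun d => decide (a ≤ d ∧ d ≤ b)) : Int) := by
  by_cases hab : a ≤ b
  · -- a ≤ b: the count of elements ≤ b splits at a, so the difference is exact and nonnegative
    have hsplit : l.countP (fun d => decide (d ≤ b))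
        = l.countP (fun d => decide (d < a)) + l.countP (fun d => decide (a ≤ d ∧ d ≤ b)) := by
      induction l with
      | nil => simp
      | cons x t ih =>
        simp only [List.countP_cons, ih]
        by_cases h1 : x ≤ b <;> by_cases h2 : x < a <;> by_cases h4 : a ≤ x <;>
          simp [h1, h2, h4] <;> omega
    rw [hsplit]; push_cast; omega
  · -- b < a: the interval is empty and every element ≤ b is also < a
    have hz : l.countP (fun d => decide (a ≤ d ∧ d ≤ b)) = 0 := by
      rw [List.countP_eq_zero]; intro x _; simp; omega
    have hle : l.countP (fun d => decide (d ≤ b)) ≤ l.countP (fun d => decide (d < a)) := by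
      apply List.countP_mono_left
      intro x _ h; simp at h ⊢; omega
    rw [hz]
    have : (l.countP (fun d => decide (d ≤ b)) : Int) ≤ (l.countP (fun d => decide (d < a)) : Int) := by
      exact_mod_cast hle
    push_cast
    omega

-- ===== VERDICT (by name: the statement is the Claim_ definition above) =====
theorem birthday_ranges_spec : Claim_equal_birthday_ranges := by
  intro birthdays ranges _
  unfold Spec_birthday_ranges birthday_ranges birthday_ranges_alt
  rw [PySem.List.foldl_append_singleton_eq_map]
  simp only [List.nil_append]
  apply List.map_congr_left
  intro r _
  set ys := PySem.List.sorted birthdays (fun x => x) false with hys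
  have hs : ys.Pairwise (fun x y => x ≤ y) := PySem.List.sorted_pairwise birthdays (fun x => x)
  have hperm : ys.Perm birthdays := PySem.List.sorted_perm birthdays (fun x => x) false
  rw [innerA_eq_countP, bisectRight_eq_countP ys r.2 hs, bisectLeft_eq_countP ys r.1 hs]
  rw [hperm.countP_eq, hperm.countP_eq, countP_interval]
  omega
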